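-- pv_equiv track=rewrite | github.com/skirmani/kirmani-synthesis-mesh | kirmani_synthesis/intelligence/alpha.py | _determine_entry_type
-- ===== SOURCE A (Python) =====
-- from enum import Enum
--
-- class EntryType(str, Enum):
--     """Type of entry signal"""
--     BREAKOUT = "BREAKOUT"
--     PULLBACK = "PULLBACK"
--     REVERSAL = "REVERSAL"
--     CONTINUATION = "CONTINUATION"
--     ACCUMULATION = "ACCUMULATION"
--     CYCLE_TURN = "CYCLE_TURN"
--
-- def _determine_entry_type(signals: list[dict]) -> EntryType:
--     """Determine entry type from signals"""
--     signal_types = [s.get("signal_type", "") for s in signals]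
--
--     if "ACCUMULATION" in signal_types or "SPRING" in signal_types:
--         return EntryType.ACCUMULATION
--     if "BREAKOUT" in signal_types:
--         return EntryType.BREAKOUT
--     if "PULLBACK" in signal_types:
--         return EntryType.PULLBACK
--     if "CYCLE_TURN" in signal_types or "TROUGH" in signal_types:
--         return EntryType.CYCLE_TURN
--     if "REVERSAL" in signal_types:
--         return EntryType.REVERSAL
--
--     return EntryType.CONTINUATION
-- ===== SOURCE B (Python) =====
-- from enum import Enum
--
-- class EntryType(str, Enum):
--     """Type of entry signal"""
--     BREAKOUT = "BREAKOUT"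
--     PULLBACK = "PULLBACK"
--     REVERSAL = "REVERSAL"
--     CONTINUATION = "CONTINUATION"
--     ACCUMULATION = "ACCUMULATION"
--     CYCLE_TURN = "CYCLE_TURN"
--
-- # priority rank (lower = higher priority) and resulting entry type per signal type
-- _RANK = {
--     "ACCUMULATION": (0, EntryType.ACCUMULATION),
--     "SPRING": (0, EntryType.ACCUMULATION),
--     "BREAKOUT": (1, EntryType.BREAKOUT),
--     "PULLBACK": (2, EntryType.PULLBACK),
--     "CYCLE_TURN": (3, EntryType.CYCLE_TURN),
--     "TROUGH": (3, EntryType.CYCLE_TURN),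
--     "REVERSAL": (4, EntryType.REVERSAL),
-- }
--
-- def _determine_entry_type(signals: list[dict]) -> EntryType:
--     """Determine entry type from signals (single pass, keep the best-ranked match)"""
--     best = None
--     for s in signals:
--         entry = _RANK.get(s.get("signal_type", ""))
--         if entry is not None and (best is None or entry[0] < best[0]):
--             best = entry
--     return best[1] if best is not None else EntryType.CONTINUATION
-- ===== Notes on version B (the rewrite author's own statement) =====
-- stated objective: faster
-- what changed: Replaced seven repeated membership scans over the extracted signal-type list by one pass that looks each signal type up in a rank table and keeps the minimum-rank match.
import Mathlib
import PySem

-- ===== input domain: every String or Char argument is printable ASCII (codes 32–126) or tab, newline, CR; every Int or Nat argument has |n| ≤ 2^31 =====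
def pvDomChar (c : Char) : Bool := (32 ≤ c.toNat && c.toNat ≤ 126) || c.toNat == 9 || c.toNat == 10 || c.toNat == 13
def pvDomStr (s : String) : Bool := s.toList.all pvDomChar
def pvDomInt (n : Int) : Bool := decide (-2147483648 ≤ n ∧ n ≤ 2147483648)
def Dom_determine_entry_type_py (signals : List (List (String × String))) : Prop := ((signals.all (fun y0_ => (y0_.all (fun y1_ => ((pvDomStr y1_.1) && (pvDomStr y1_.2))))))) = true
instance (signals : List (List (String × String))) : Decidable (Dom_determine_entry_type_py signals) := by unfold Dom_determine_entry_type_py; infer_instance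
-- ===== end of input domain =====

-- B replaces A's seven repeated membership scans with one table-indexed pass keeping the minimum-rank match.


-- ===== PORT A =====
def determine_entry_type_py (signals : List (List (String × String))) : String :=
  let signal_types := signals.map (fun s => (PySem.Dict.mk s).getD "signal_type" "")
  if signal_types.contains "ACCUMULATION" || signal_types.contains "SPRING" then "ACCUMULATION"
  else if signal_types.contains "BREAKOUT" then "BREAKOUT"
  else if signal_types.contains "PULLBACK" then "PULLBACK"
  else if signal_types.contains "CYCLE_TURN" || signal_types.contains "TROUGH" then "CYCLE_TURN"
  else if signal_types.contains "REVERSAL" then "REVERSAL"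
  else "CONTINUATION"

-- ===== PORT B =====
-- the _RANK table of Source B
def pvRankTable : PySem.Dict String (Nat × String) := PySem.Dict.mk
  [("ACCUMULATION", (0, "ACCUMULATION")),
   ("SPRING", (0, "ACCUMULATION")),
   ("BREAKOUT", (1, "BREAKOUT")),
   ("PULLBACK", (2, "PULLBACK")),
   ("CYCLE_TURN", (3, "CYCLE_TURN")),
   ("TROUGH", (3, "CYCLE_TURN")),
   ("REVERSAL", (4, "REVERSAL"))]

-- body of Source B's for-loop
def pvStepB (best : Option (Nat × String)) (s : List (String × String)) : Option (Nat × String) :=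
  match pvRankTable.get? ((PySem.Dict.mk s).getD "signal_type" "") with
  | none => best
  | some entry =>
    match best with
    | none => some entry
    | some b => if entry.1 < b.1 then some entry else some b

def determine_entry_type_py_alt (signals : List (List (String × String))) : String :=
  match signals.foldl pvStepB none with
  | some b => b.2
  | none => "CONTINUATION"

-- ===== PRECONDITION & SPEC =====
def Spec_determine_entry_type_py (signals : List (List (String × String))) (out : String) : Prop := out = determine_entry_type_py_alt signals
instance (signals : List (List (String × String))) (out : String) : Decidable (Spec_determine_entry_type_py signals out) := by unfold Spec_determine_entry_type_py; infer_instance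

-- ===== CLAIM (what is proved, stated in full; the proofs are below) =====
def Claim_equal_determine_entry_type_py : Prop := ∀ (signals : List (List (String × String))), Dom_determine_entry_type_py signals → Spec_determine_entry_type_py signals (determine_entry_type_py signals)

-- ===== LEMMAS AND PROOFS =====

-- proof-side helpers: the rank of a signal-type string (5 = unmatched),
-- and the canonical accumulator value for each rank
def pvRk (t : String) : Nat :=
  match pvRankTable.get? t with
  | none => 5
  | some e => e.1

def pvPr (n : Nat) : Option (Nat × String) :=
  if n = 0 then some (0, "ACCUMULATION")
  else if n = 1 then some (1, "BREAKOUT")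
  else if n = 2 then some (2, "PULLBACK")
  else if n = 3 then some (3, "CYCLE_TURN")
  else if n = 4 then some (4, "REVERSAL")
  else none

lemma pvPr_of_ge (n : Nat) (h : 5 ≤ n) : pvPr n = none := by
  unfold pvPr; split_ifs <;> first | rfl | omega

lemma pvGet_eq_pr (t : String) : pvRankTable.get? t = pvPr (pvRk t) := by
  unfold pvRk pvRankTable
  simp only [PySem.Dict.get?]
  rcases eq_or_ne "ACCUMULATION" t with h1 | h1
  · subst h1; decide
  rw [List.find?_cons_of_neg (by simp [h1])]
  rcases eq_or_ne "SPRING" t with h2 | h2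
  · subst h2; decide
  rw [List.find?_cons_of_neg (by simp [h2])]
  rcases eq_or_ne "BREAKOUT" t with h3 | h3
  · subst h3; decide
  rw [List.find?_cons_of_neg (by simp [h3])]
  rcases eq_or_ne "PULLBACK" t with h4 | h4
  · subst h4; decide
  rw [List.find?_cons_of_neg (by simp [h4])]
  rcases eq_or_ne "CYCLE_TURN" t with h5 | h5
  · subst h5; decide
  rw [List.find?_cons_of_neg (by simp [h5])]
  rcases eq_or_ne "TROUGH" t with h6 | h6
  · subst h6; decide
  rw [List.find?_cons_of_neg (by simp [h6])]
  rcases eq_or_ne "REVERSAL" t with h7 | h7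
  · subst h7; decide
  rw [List.find?_cons_of_neg (by simp [h7])]
  simp [pvPr]

lemma pvRk_cases (t : String) :
    pvRk t = if t = "ACCUMULATION" then 0 else if t = "SPRING" then 0
      else if t = "BREAKOUT" then 1 else if t = "PULLBACK" then 2
      else if t = "CYCLE_TURN" then 3 else if t = "TROUGH" then 3
      else if t = "REVERSAL" then 4 else 5 := by
  unfold pvRk pvRankTable
  simp only [PySem.Dict.get?]
  rcases eq_or_ne "ACCUMULATION" t with h1 | h1
  · subst h1; decide
  rw [if_neg (Ne.symm h1), List.find?_cons_of_neg (by simp [h1])]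
  rcases eq_or_ne "SPRING" t with h2 | h2
  · subst h2; decide
  rw [if_neg (Ne.symm h2), List.find?_cons_of_neg (by simp [h2])]
  rcases eq_or_ne "BREAKOUT" t with h3 | h3
  · subst h3; decide
  rw [if_neg (Ne.symm h3), List.find?_cons_of_neg (by simp [h3])]
  rcases eq_or_ne "PULLBACK" t with h4 | h4
  · subst h4; decide
  rw [if_neg (Ne.symm h4), List.find?_cons_of_neg (by simp [h4])]
  rcases eq_or_ne "CYCLE_TURN" t with h5 | h5
  · subst h5; decide
  rw [if_neg (Ne.symm h5), List.find?_cons_of_neg (by simp [h5])]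
  rcases eq_or_ne "TROUGH" t with h6 | h6
  · subst h6; decide
  rw [if_neg (Ne.symm h6), List.find?_cons_of_neg (by simp [h6])]
  rcases eq_or_ne "REVERSAL" t with h7 | h7
  · subst h7; decide
  rw [if_neg (Ne.symm h7), List.find?_cons_of_neg (by simp [h7])]
  simp

lemma pvStepB_pr (n : Nat) (s : List (String × String)) :
    pvStepB (pvPr n) s = pvPr (min n (pvRk ((PySem.Dict.mk s).getD "signal_type" ""))) := by
  unfold pvStepB
  rw [pvGet_eq_pr]
  generalize pvRk ((PySem.Dict.mk s).getD "signal_type" "") = r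
  rcases Nat.lt_or_ge n 5 with hn | hn <;> rcases Nat.lt_or_ge r 5 with hr | hr
  · interval_cases n <;> interval_cases r <;> decide
  · simp [pvPr_of_ge r hr, Nat.min_eq_left (by omega : n ≤ r)]
  · rw [pvPr_of_ge n hn, Nat.min_eq_right (by omega : r ≤ n)]
    interval_cases r <;> simp [pvPr]
  · have h5 : 5 ≤ min n r := by omega
    simp [pvPr_of_ge n hn, pvPr_of_ge r hr, pvPr_of_ge _ h5]

lemma pvFold_pr (signals : List (List (String × String))) :
    ∀ n : Nat, signals.foldl pvStepB (pvPr n) =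
      pvPr (signals.foldl (fun m s => min m (pvRk ((PySem.Dict.mk s).getD "signal_type" ""))) n) := by
  induction signals with
  | nil => intro n; rfl
  | cons s rest ih =>
    intro n
    simp only [List.foldl_cons, pvStepB_pr, ih]

-- rank levels of a string, read off the table
lemma pvRk_eq_zero_iff (t : String) : pvRk t = 0 ↔ t = "ACCUMULATION" ∨ t = "SPRING" := by
  rw [pvRk_cases]; split_ifs <;> subst_vars <;> simp_all

lemma pvRk_eq_one_iff (t : String) : pvRk t = 1 ↔ t = "BREAKOUT" := by
  rw [pvRk_cases]; split_ifs <;> subst_vars <;> simp_all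

lemma pvRk_eq_two_iff (t : String) : pvRk t = 2 ↔ t = "PULLBACK" := by
  rw [pvRk_cases]; split_ifs <;> subst_vars <;> simp_all

lemma pvRk_eq_three_iff (t : String) : pvRk t = 3 ↔ t = "CYCLE_TURN" ∨ t = "TROUGH" := by
  rw [pvRk_cases]; split_ifs <;> subst_vars <;> simp_all

lemma pvRk_eq_four_iff (t : String) : pvRk t = 4 ↔ t = "REVERSAL" := by
  rw [pvRk_cases]; split_ifs <;> subst_vars <;> simp_all

-- the min-fold ≤ r iff the start is ≤ r or some element's rank is ≤ r
lemma pvMinFold_le_iff (rk : List (String × String) → Nat) (signals : List (List (String × String))) :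
    ∀ (n r : Nat), signals.foldl (fun m s => min m (rk s)) n ≤ r ↔
      n ≤ r ∨ ∃ s ∈ signals, rk s ≤ r := by
  induction signals with
  | nil => intro n r; simp
  | cons s rest ih =>
    intro n r
    simp only [List.foldl_cons, ih, List.mem_cons]
    constructor
    · rintro (h | ⟨x, hx, hxr⟩)
      · rcases min_le_iff.mp h <;> [exact Or.inl ‹_›; exact Or.inr ⟨s, Or.inl rfl, ‹_›⟩]
      · exact Or.inr ⟨x, Or.inr hx, hxr⟩
    · rintro (h | ⟨x, hx | hx, hxr⟩)
      · exact Or.inl (le_trans (Nat.min_le_left _ _) h)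
      · exact Or.inl (le_trans (Nat.min_le_right _ _) (hx ▸ hxr))
      · exact Or.inr ⟨x, hx, hxr⟩

theorem determine_entry_type_py_spec_aux (signals : List (List (String × String))) :
    determine_entry_type_py signals = determine_entry_type_py_alt signals := by
  have hfold := pvFold_pr signals 5
  have hle := pvMinFold_le_iff (fun s => pvRk ((PySem.Dict.mk s).getD "signal_type" "")) signals
  set M := signals.foldl (fun m s => min m (pvRk ((PySem.Dict.mk s).getD "signal_type" ""))) 5 with hMdef
  have hM5 : M ≤ 5 := by rw [hMdef, hle]; exact Or.inl le_rfl
  -- E k: some signal has rank k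
  set E : Nat → Prop := fun k => ∃ s ∈ signals, pvRk ((PySem.Dict.mk s).getD "signal_type" "") = k with hE
  have hm0 : M ≤ 0 ↔ E 0 := by
    rw [hMdef, hle]
    constructor
    · rintro (h | ⟨s, hs, hr⟩)
      · omega
      · exact ⟨s, hs, Nat.le_zero.mp hr⟩
    · rintro ⟨s, hs, hr⟩; exact Or.inr ⟨s, hs, le_of_eq hr⟩
  have hm1 : M ≤ 1 ↔ E 0 ∨ E 1 := by
    rw [hMdef, hle]
    constructor
    · rintro (h | ⟨s, hs, hr⟩)
      · omega
      · rcases (by omega : pvRk ((PySem.Dict.mk s).getD "signal_type" "") = 0 ∨ pvRk ((PySem.Dict.mk s).getD "signal_type" "") = 1) with h' | h'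
        · exact Or.inl ⟨s, hs, h'⟩
        · exact Or.inr ⟨s, hs, h'⟩
    · rintro (⟨s, hs, hr⟩ | ⟨s, hs, hr⟩) <;> exact Or.inr ⟨s, hs, by omega⟩
  have hm2 : M ≤ 2 ↔ E 0 ∨ E 1 ∨ E 2 := by
    rw [hMdef, hle]
    constructor
    · rintro (h | ⟨s, hs, hr⟩)
      · omega
      · rcases (by omega : pvRk ((PySem.Dict.mk s).getD "signal_type" "") = 0 ∨ pvRk ((PySem.Dict.mk s).getD "signal_type" "") = 1 ∨ pvRk ((PySem.Dict.mk s).getD "signal_type" "") = 2) with h' | h' | h'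
        · exact Or.inl ⟨s, hs, h'⟩
        · exact Or.inr (Or.inl ⟨s, hs, h'⟩)
        · exact Or.inr (Or.inr ⟨s, hs, h'⟩)
    · rintro (⟨s, hs, hr⟩ | ⟨s, hs, hr⟩ | ⟨s, hs, hr⟩) <;> exact Or.inr ⟨s, hs, by omega⟩
  have hm3 : M ≤ 3 ↔ E 0 ∨ E 1 ∨ E 2 ∨ E 3 := by
    rw [hMdef, hle]
    constructor
    · rintro (h | ⟨s, hs, hr⟩)
      · omega
      · rcases (by omega : pvRk ((PySem.Dict.mk s).getD "signal_type" "") = 0 ∨ pvRk ((PySem.Dict.mk s).getD "signal_type" "") = 1 ∨ pvRk ((PySem.Dict.mk s).getD "signal_type" "") = 2 ∨ pvRk ((PySem.Dict.mk s).getD "signal_type" "") = 3) with h' | h' | h' | h'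
        · exact Or.inl ⟨s, hs, h'⟩
        · exact Or.inr (Or.inl ⟨s, hs, h'⟩)
        · exact Or.inr (Or.inr (Or.inl ⟨s, hs, h'⟩))
        · exact Or.inr (Or.inr (Or.inr ⟨s, hs, h'⟩))
    · rintro (⟨s, hs, hr⟩ | ⟨s, hs, hr⟩ | ⟨s, hs, hr⟩ | ⟨s, hs, hr⟩) <;> exact Or.inr ⟨s, hs, by omega⟩
  have hm4 : M ≤ 4 ↔ E 0 ∨ E 1 ∨ E 2 ∨ E 3 ∨ E 4 := by
    rw [hMdef, hle]
    constructor
    · rintro (h | ⟨s, hs, hr⟩)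
      · omega
      · rcases (by omega : pvRk ((PySem.Dict.mk s).getD "signal_type" "") = 0 ∨ pvRk ((PySem.Dict.mk s).getD "signal_type" "") = 1 ∨ pvRk ((PySem.Dict.mk s).getD "signal_type" "") = 2 ∨ pvRk ((PySem.Dict.mk s).getD "signal_type" "") = 3 ∨ pvRk ((PySem.Dict.mk s).getD "signal_type" "") = 4) with h' | h' | h' | h' | h'
        · exact Or.inl ⟨s, hs, h'⟩
        · exact Or.inr (Or.inl ⟨s, hs, h'⟩)
        · exact Or.inr (Or.inr (Or.inl ⟨s, hs, h'⟩))
        · exact Or.inr (Or.inr (Or.inr (Or.inl ⟨s, hs, h'⟩)))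
        · exact Or.inr (Or.inr (Or.inr (Or.inr ⟨s, hs, h'⟩)))
    · rintro (⟨s, hs, hr⟩ | ⟨s, hs, hr⟩ | ⟨s, hs, hr⟩ | ⟨s, hs, hr⟩ | ⟨s, hs, hr⟩) <;> exact Or.inr ⟨s, hs, by omega⟩
  -- the membership conditions of A in terms of E
  have hc : ∀ lit : String,
      ((signals.map (fun s => (PySem.Dict.mk s).getD "signal_type" "")).contains lit = true) ↔
        ∃ s ∈ signals, (PySem.Dict.mk s).getD "signal_type" "" = lit := by
    intro lit; simp [eq_comm]
  have hcond0 : ((signals.map (fun s => (PySem.Dict.mk s).getD "signal_type" "")).contains "ACCUMULATION"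
      || (signals.map (fun s => (PySem.Dict.mk s).getD "signal_type" "")).contains "SPRING") = true ↔ E 0 := by
    rw [Bool.or_eq_true, hc, hc, hE]
    constructor
    · rintro (⟨s, hs, h'⟩ | ⟨s, hs, h'⟩) <;> exact ⟨s, hs, (pvRk_eq_zero_iff _).mpr (by simp [h'])⟩
    · rintro ⟨s, hs, h'⟩
      rcases (pvRk_eq_zero_iff _).mp h' with h'' | h''
      · exact Or.inl ⟨s, hs, h''⟩
      · exact Or.inr ⟨s, hs, h''⟩
  have hcond1 : ((signals.map (fun s => (PySem.Dict.mk s).getD "signal_type" "")).contains "BREAKOUT") = true ↔ E 1 := by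
    rw [hc, hE]
    exact ⟨fun ⟨s, hs, h'⟩ => ⟨s, hs, (pvRk_eq_one_iff _).mpr h'⟩,
           fun ⟨s, hs, h'⟩ => ⟨s, hs, (pvRk_eq_one_iff _).mp h'⟩⟩
  have hcond2 : ((signals.map (fun s => (PySem.Dict.mk s).getD "signal_type" "")).contains "PULLBACK") = true ↔ E 2 := by
    rw [hc, hE]
    exact ⟨fun ⟨s, hs, h'⟩ => ⟨s, hs, (pvRk_eq_two_iff _).mpr h'⟩,
           fun ⟨s, hs, h'⟩ => ⟨s, hs, (pvRk_eq_two_iff _).mp h'⟩⟩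
  have hcond3 : ((signals.map (fun s => (PySem.Dict.mk s).getD "signal_type" "")).contains "CYCLE_TURN"
      || (signals.map (fun s => (PySem.Dict.mk s).getD "signal_type" "")).contains "TROUGH") = true ↔ E 3 := by
    rw [Bool.or_eq_true, hc, hc, hE]
    constructor
    · rintro (⟨s, hs, h'⟩ | ⟨s, hs, h'⟩) <;> exact ⟨s, hs, (pvRk_eq_three_iff _).mpr (by simp [h'])⟩
    · rintro ⟨s, hs, h'⟩
      rcases (pvRk_eq_three_iff _).mp h' with h'' | h''
      · exact Or.inl ⟨s, hs, h''⟩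
      · exact Or.inr ⟨s, hs, h''⟩
  have hcond4 : ((signals.map (fun s => (PySem.Dict.mk s).getD "signal_type" "")).contains "REVERSAL") = true ↔ E 4 := by
    rw [hc, hE]
    exact ⟨fun ⟨s, hs, h'⟩ => ⟨s, hs, (pvRk_eq_four_iff _).mpr h'⟩,
           fun ⟨s, hs, h'⟩ => ⟨s, hs, (pvRk_eq_four_iff _).mp h'⟩⟩
  have hpr : signals.foldl pvStepB none = pvPr M := by
    rw [hMdef]
    simpa [pvPr] using hfold
  unfold determine_entry_type_py determine_entry_type_py_alt
  rw [hpr]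
  clear hfold hle hc hMdef hE
  by_cases h0 : E 0 <;> by_cases h1 : E 1 <;> by_cases h2 : E 2 <;>
    by_cases h3 : E 3 <;> by_cases h4 : E 4 <;>
    simp only [h0, h1, h2, h3, h4, iff_true, iff_false, or_true, or_false,
      or_self] at hm0 hm1 hm2 hm3 hm4 <;>
    rcases (by omega : M = 0 ∨ M = 1 ∨ M = 2 ∨ M = 3 ∨ M = 4 ∨ M = 5) with h | h | h | h | h | h <;>
    first
      | omega
      | (simp only [hcond0, hcond1, hcond2, hcond3, hcond4]
         simp [h0, h1, h2, h3, h4, h, pvPr])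

-- ===== VERDICT (by name: the statement is the Claim_ definition above) =====
theorem determine_entry_type_py_spec : Claim_equal_determine_entry_type_py := by
  intro signals _
  exact determine_entry_type_py_spec_aux signals
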